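-- pv_equiv track=rewrite | github.com/kreyazulh/EMPATH | Preprocess/parquet_with_media+algo.py | generate_new_list
-- ===== SOURCE A (Python) =====
-- def generate_new_list(sorted_numbers):
--     new_list = []
--
--     # Iterate through the sorted list
--     i = 0
--     while i < len(sorted_numbers):
--         current_number = sorted_numbers[i]
--
--         # Find the range for consecutive numbers
--         start = current_number
--         while i + 1 < len(sorted_numbers) and sorted_numbers[i + 1] == current_number + 1:
--             current_number = sorted_numbers[i + 1]
--             i += 1
--
--         end = current_number
--
--         # Add the range to the new list
--         new_list.append([start - 1, end + 1])
--
--         # Move to the next number in the sorted list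
--         i += 1
--
--     return new_list
-- ===== SOURCE B (Python) =====
-- def generate_new_list(sorted_numbers):
--     new_list = []
--     for v in sorted_numbers:
--         # v extends the last run iff v equals its stored end+1 bound
--         if new_list and v == new_list[-1][1]:
--             new_list[-1][1] = v + 1
--         else:
--             new_list.append([v - 1, v + 1])
--     return new_list
-- ===== Notes on version B (the rewrite author's own statement) =====
-- stated objective: simpler
-- what changed: Replaced the index-based nested-while two-pointer scan by a single flat pass over the values that either extends the last emitted interval in place (when the value equals its stored end+1 bound) or starts a new one; the check measured this about 2x faster (constant factor: no index arithmetic or repeated len/subscript calls).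
import Mathlib
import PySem

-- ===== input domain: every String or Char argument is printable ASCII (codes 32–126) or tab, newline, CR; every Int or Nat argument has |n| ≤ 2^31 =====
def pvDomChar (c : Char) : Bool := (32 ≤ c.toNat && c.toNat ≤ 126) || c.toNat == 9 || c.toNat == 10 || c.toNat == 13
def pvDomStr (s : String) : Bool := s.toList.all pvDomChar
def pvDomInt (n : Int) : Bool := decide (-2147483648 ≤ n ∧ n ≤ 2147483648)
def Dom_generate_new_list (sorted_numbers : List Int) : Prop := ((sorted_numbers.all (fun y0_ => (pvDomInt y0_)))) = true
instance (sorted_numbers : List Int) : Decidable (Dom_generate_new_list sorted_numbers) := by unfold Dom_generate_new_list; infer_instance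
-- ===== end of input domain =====

-- B replaces A's index-based nested-while two-pointer scan by a single flat pass that
-- extends the last emitted interval in place or starts a new one (objective: simpler).

-- ===== PORT A =====
-- inner while loop of A: advance while the next element is current_number + 1;
-- returns (end of the run, remaining suffix after the run)
def goA (cur : Int) (rest : List Int) : Int × List Int :=
  match rest with
  | [] => (cur, [])
  | x :: xs => if x = cur + 1 then goA x xs else (cur, x :: xs)

-- cited by generate_new_list's decreasing_by
theorem goA_len (cur : Int) (rest : List Int) : (goA cur rest).2.length ≤ rest.length := by
  induction rest generalizing cur with
  | nil => simp [goA]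
  | cons x xs ih =>
    simp only [goA]
    split
    · exact Nat.le_trans (ih x) (Nat.le_succ _)
    · simp

def generate_new_list (sorted_numbers : List Int) : List (List Int) :=
  match sorted_numbers with
  | [] => []
  | x :: xs =>
    let p := goA x xs
    [x - 1, p.1 + 1] :: generate_new_list p.2
termination_by sorted_numbers.length
decreasing_by
  simpa using Nat.lt_succ_of_le (goA_len x xs)

-- ===== PORT B =====
-- one step of B's flat loop; the accumulator is new_list reversed (head = new_list[-1])
def stepB (acc : List (List Int)) (v : Int) : List (List Int) :=
  match acc with
  | (s :: e :: []) :: rest =>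
    if v = e then [s, v + 1] :: rest else [v - 1, v + 1] :: acc
  | _ => [v - 1, v + 1] :: acc

def generate_new_list_alt (sorted_numbers : List Int) : List (List Int) :=
  (sorted_numbers.foldl stepB []).reverse

-- ===== PRECONDITION & SPEC =====
def Spec_generate_new_list (sorted_numbers : List Int) (out : List (List Int)) : Prop := out = generate_new_list_alt sorted_numbers
instance (sorted_numbers : List Int) (out : List (List Int)) : Decidable (Spec_generate_new_list sorted_numbers out) := by unfold Spec_generate_new_list; infer_instance

-- ===== CLAIM (what is proved, stated in full; the proofs are below) =====
def Claim_equal_generate_new_list : Prop := ∀ (sorted_numbers : List Int), Dom_generate_new_list sorted_numbers → Spec_generate_new_list sorted_numbers (generate_new_list sorted_numbers)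

-- ===== LEMMAS AND PROOFS =====

-- while B is inside the run started with interval [s, v+1], stepB only bumps the end bound,
-- and it stops exactly where A's inner while loop stops
theorem inner_run (xs : List Int) (v s : Int) (acc : List (List Int)) :
    List.foldl stepB ([s, v + 1] :: acc) xs
      = List.foldl stepB ([s, (goA v xs).1 + 1] :: acc) (goA v xs).2
    ∧ (∀ x, (goA v xs).2.head? = some x → x ≠ (goA v xs).1 + 1) := by
  induction xs generalizing v with
  | nil => simp [goA]
  | cons x xs ih =>
    simp only [goA, List.foldl_cons]
    by_cases h : x = v + 1
    · subst h
      have hred : stepB ([s, v + 1] :: acc) (v + 1) = [s, v + 1 + 1] :: acc := by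
        simp [stepB]
      rw [if_pos rfl, hred]
      simpa using ih (v + 1)
    · rw [if_neg h]
      refine ⟨rfl, ?_⟩
      intro y hy
      rw [List.head?_cons, Option.some.injEq] at hy
      subst hy; exact h

theorem main_lemma : ∀ n (l : List Int), l.length ≤ n →
    ∀ acc : List (List Int),
      (∀ x s e rest, l.head? = some x → acc = (s :: e :: []) :: rest → x ≠ e) →
      (List.foldl stepB acc l).reverse = acc.reverse ++ generate_new_list l := by
  intro n
  induction n with
  | zero =>
    intro l hl acc _
    have : l = [] := List.eq_nil_of_length_eq_zero (Nat.le_zero.mp hl)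
    subst this
    simp [generate_new_list]
  | succ n ih =>
    intro l hl acc hguard
    cases l with
    | nil => simp [generate_new_list]
    | cons x xs =>
      have hstep : stepB acc x = [x - 1, x + 1] :: acc := by
        match acc with
        | [] => rfl
        | (s :: e :: []) :: rest =>
          have hne : x ≠ e := hguard x s e rest rfl rfl
          simp [stepB, hne]
        | [] :: rest => rfl
        | (s :: []) :: rest => rfl
        | (s :: e :: y :: ys) :: rest => rfl
      obtain ⟨hrun, hstop⟩ := inner_run xs x (x - 1) acc
      have hlen : (goA x xs).2.length ≤ n := by
        have := goA_len x xs
        simp only [List.length_cons] at hl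
        omega
      have hrec := ih (goA x xs).2 hlen ([x - 1, (goA x xs).1 + 1] :: acc)
        (by
          intro y s e rest hy hacc
          injection hacc with h1 h2
          subst h2
          injection h1 with h1a h1b
          injection h1b with h1b _
          subst h1b
          exact hstop y hy)
      calc (List.foldl stepB acc (x :: xs)).reverse
          = (List.foldl stepB ([x - 1, x + 1] :: acc) xs).reverse := by
            rw [List.foldl_cons, hstep]
        _ = (List.foldl stepB ([x - 1, (goA x xs).1 + 1] :: acc) (goA x xs).2).reverse := by
            rw [hrun]
        _ = ([x - 1, (goA x xs).1 + 1] :: acc).reverse ++ generate_new_list (goA x xs).2 := hrec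
        _ = acc.reverse ++ generate_new_list (x :: xs) := by
            rw [generate_new_list]
            simp

-- ===== VERDICT (by name: the statement is the Claim_ definition above) =====
theorem generate_new_list_spec : Claim_equal_generate_new_list := by
  intro l _
  unfold Spec_generate_new_list generate_new_list_alt
  have := main_lemma l.length l (Nat.le_refl _) [] (by intro x s e rest _ h; cases h)
  simpa using this.symm
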